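-- pv_equiv track=rewrite | github.com/wanggaa/leetcode | 984.string-without-aaa-or-bbb.py | strWithout3a3b
-- ===== SOURCE A (Python) =====
-- def strWithout3a3b(A: int, B: int) -> str:
--     a,b = max(A,B),min(A,B)
--     s_ans = ''
--     while a > b and b != 0:
--         s_ans += 'aab'
--         a -= 2
--         b -= 1
--     if a == b:
--         s_ans += 'ab'* a
--     if b == 0:
--         s_ans += 'a' * a
--     if A<B:
--         s_ans = ''.join(['b' if c == 'a' else 'a' for c in s_ans])
--     return s_ans
-- ===== SOURCE B (Python) =====
-- def strWithout3a3b(A: int, B: int) -> str: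
--     a, b = max(A, B), min(A, B)
--     d = a - b
--     if d <= b:
--         blocks = ['aab'] * d + ['ab'] * (b - d)
--     else:
--         blocks = ['aab'] * b + ['a'] * (a - 2 * b)
--     s = ''.join(blocks)
--     if A < B:
--         s = ''.join('b' if c == 'a' else 'a' for c in s)
--     return s
-- ===== Notes on version B (the rewrite author's own statement) =====
-- stated objective: simpler
-- what changed: Replaces the greedy while-loop that appends one 'aab' block per iteration with a direct closed-form computation of the block counts (blocks = ['aab']*d + ['ab']*(b-d) when d<=b, else ['aab']*b + ['a']*(a-2b), joined once), keeping the final swap for A < B.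
-- outside the precondition, e.g. on strWithout3a3b(-1, -2): A returns 'aab', B returns 'aaa'; on strWithout3a3b(9, -1): A returns 'aabaabaabaabaabaabaabaabaabaab', B returns 'aaaaaaaaaaa'
import Mathlib
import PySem

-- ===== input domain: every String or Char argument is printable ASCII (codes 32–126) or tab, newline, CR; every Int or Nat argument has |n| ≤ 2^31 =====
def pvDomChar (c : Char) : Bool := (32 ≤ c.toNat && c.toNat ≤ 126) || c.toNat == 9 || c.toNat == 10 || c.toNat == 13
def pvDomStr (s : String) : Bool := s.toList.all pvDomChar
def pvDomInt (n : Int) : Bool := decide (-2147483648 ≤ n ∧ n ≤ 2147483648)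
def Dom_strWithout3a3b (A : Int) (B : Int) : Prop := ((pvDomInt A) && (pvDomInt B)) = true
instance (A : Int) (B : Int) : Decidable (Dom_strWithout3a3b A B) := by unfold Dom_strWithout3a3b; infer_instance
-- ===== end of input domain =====

-- B replaces A's greedy while-loop by a closed-form computation of the block counts (simpler, no loop).

-- Python's  s * n  (negative count gives the empty repetition), used by A's 'ab'*a / 'a'*a
-- and, on List String, by B's block lists
def pyRepeatNat (s : String) : Nat → String
  | 0 => ""
  | n + 1 => s ++ pyRepeatNat s n

def pyRepeat (s : String) (n : Int) : String := pyRepeatNat s n.toNat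

-- ===== PORT A =====
-- the while-loop of A, state (a, b, s_ans)
def strWithout3a3bLoop (a b : Int) (s : String) : String :=
  if _h : b < a ∧ b ≠ 0 then
    strWithout3a3bLoop (a - 2) (b - 1) (s ++ "aab")
  else
    let s1 := if a = b then s ++ pyRepeat "ab" a else s
    let s2 := if b = 0 then s1 ++ pyRepeat "a" a else s1
    s2
termination_by (a - b).toNat
decreasing_by omega

def strWithout3a3b (A : Int) (B : Int) : String :=
  let a := max A B
  let b := min A B
  let s := strWithout3a3bLoop a b ""
  if A < B then String.ofList (s.toList.map (fun c => if c = 'a' then 'b' else 'a')) else s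

-- ===== PORT B =====
def strWithout3a3b_alt (A : Int) (B : Int) : String :=
  let a := max A B
  let b := min A B
  let d := a - b
  let blocks := if d ≤ b then List.replicate d.toNat "aab" ++ List.replicate (b - d).toNat "ab"
                else List.replicate b.toNat "aab" ++ List.replicate (a - 2 * b).toNat "a"
  let s := blocks.foldl (· ++ ·) ""   -- ''.join(blocks)
  if A < B then String.ofList (s.toList.map (fun c => if c = 'a' then 'b' else 'a')) else s

-- ===== PRECONDITION & SPEC =====
-- Pre_ restricts to the function's natural domain of nonnegative letter counts;
-- on negative counts A still returns a string, but that value (e.g. 'aab' for (-1,-2))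
-- is an accident of the loop over negative state, not part of the task.
def Pre_strWithout3a3b (A : Int) (B : Int) : Prop := 0 ≤ A ∧ 0 ≤ B
instance (A : Int) (B : Int) : Decidable (Pre_strWithout3a3b A B) := by unfold Pre_strWithout3a3b; infer_instance
def pvWitness_strWithout3a3b : Int × Int := (4, 1)

def Spec_strWithout3a3b (A : Int) (B : Int) (out : String) : Prop := out = strWithout3a3b_alt A B
instance (A : Int) (B : Int) (out : String) : Decidable (Spec_strWithout3a3b A B out) := by unfold Spec_strWithout3a3b; infer_instance

-- ===== CLAIM (what is proved, stated in full; the proofs are below) =====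
def Claim_equal_strWithout3a3b : Prop := ∀ (A : Int) (B : Int), Dom_strWithout3a3b A B → Pre_strWithout3a3b A B → Spec_strWithout3a3b A B (strWithout3a3b A B)

-- ===== LEMMAS AND PROOFS =====

-- the closed form B computes (before the swap)
def closedAB (a b : Int) : String :=
  if a - b ≤ b then pyRepeat "aab" (a - b) ++ pyRepeat "ab" (b - (a - b))
  else pyRepeat "aab" b ++ pyRepeat "a" (a - 2 * b)

theorem pyRepeat_pos (s : String) {n : Int} (h : 0 < n) :
    pyRepeat s n = s ++ pyRepeat s (n - 1) := by
  unfold pyRepeat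
  have : n.toNat = (n - 1).toNat + 1 := by omega
  rw [this]
  rfl

theorem closedAB_step {a b : Int} (hb : 0 < b) (hab : b < a) :
    closedAB a b = "aab" ++ closedAB (a - 2) (b - 1) := by
  unfold closedAB
  by_cases h : a - b ≤ b
  · rw [if_pos h, if_pos (by omega : (a - 2) - (b - 1) ≤ b - 1)]
    rw [pyRepeat_pos "aab" (by omega : (0:Int) < a - b)]
    have : a - b - 1 = (a - 2) - (b - 1) := by ring
    rw [this]
    have : b - (a - b) = (b - 1) - ((a - 2) - (b - 1)) := by ring
    rw [this, String.append_assoc]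
  · rw [if_neg h, if_neg (by omega : ¬ (a - 2) - (b - 1) ≤ b - 1)]
    rw [pyRepeat_pos "aab" hb]
    have : a - 2 * b = (a - 2) - 2 * (b - 1) := by ring
    rw [this, String.append_assoc]

theorem loop_closed (n : Nat) : ∀ (a b : Int) (s : String), 0 ≤ b → b ≤ a → (a - b).toNat = n →
    strWithout3a3bLoop a b s = s ++ closedAB a b := by
  induction n with
  | zero =>
    intro a b s hb hba hn
    have hab : a = b := by omega
    rw [strWithout3a3bLoop]
    rw [dif_neg (by omega : ¬ (b < a ∧ b ≠ 0))]
    show (if b = 0 then (if a = b then s ++ pyRepeat "ab" a else s) ++ pyRepeat "a" a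
          else (if a = b then s ++ pyRepeat "ab" a else s)) = s ++ closedAB a b
    rw [if_pos hab]
    unfold closedAB
    rw [if_pos (by omega : a - b ≤ b)]
    have h0 : a - b = 0 := by omega
    rw [h0]
    by_cases hz : b = 0
    · rw [if_pos hz]
      have : b - 0 = a := by omega
      rw [this]
      have ha0 : a = 0 := by omega
      rw [ha0]
      simp [pyRepeat, pyRepeatNat]
    · rw [if_neg hz]
      have : b - 0 = a := by omega
      rw [this]
      simp [pyRepeat, pyRepeatNat]
  | succ m ih =>
    intro a b s hb hba hn
    have hab : b < a := by omega
    rw [strWithout3a3bLoop]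
    by_cases hz : b = 0
    · rw [dif_neg (by omega : ¬ (b < a ∧ b ≠ 0))]
      show (if b = 0 then (if a = b then s ++ pyRepeat "ab" a else s) ++ pyRepeat "a" a
            else (if a = b then s ++ pyRepeat "ab" a else s)) = s ++ closedAB a b
      rw [if_neg (by omega : ¬ a = b), if_pos hz]
      unfold closedAB
      rw [if_neg (by omega : ¬ a - b ≤ b), hz]
      simp [pyRepeat, pyRepeatNat]
    · rw [dif_pos ⟨hab, hz⟩]
      rw [ih (a - 2) (b - 1) (s ++ "aab") (by omega) (by omega) (by omega)]
      rw [closedAB_step (by omega) hab, String.append_assoc]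

theorem foldl_append_replicate (s : String) : ∀ (n : Nat) (acc : String),
    List.foldl (· ++ ·) acc (List.replicate n s) = acc ++ pyRepeatNat s n := by
  intro n
  induction n with
  | zero => intro acc; simp [pyRepeatNat]
  | succ m ih =>
    intro acc
    rw [List.replicate_succ, List.foldl_cons, ih (acc ++ s)]
    show acc ++ s ++ pyRepeatNat s m = acc ++ (s ++ pyRepeatNat s m)
    rw [String.append_assoc]

theorem alt_eq_closed (A B : Int) :
    strWithout3a3b_alt A B =
      (if A < B then String.ofList ((closedAB (max A B) (min A B)).toList.map
          (fun c => if c = 'a' then 'b' else 'a'))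
       else closedAB (max A B) (min A B)) := by
  unfold strWithout3a3b_alt closedAB
  by_cases h : max A B - min A B ≤ min A B <;>
    simp only [h, if_pos, List.foldl_append, foldl_append_replicate, pyRepeat] <;>
    simp [foldl_append_replicate]


theorem strWithout3a3b_spec_aux (A B : Int) (h : Pre_strWithout3a3b A B) :
    strWithout3a3b A B = strWithout3a3b_alt A B := by
  obtain ⟨hA, hB⟩ := h
  have hb : 0 ≤ min A B := by omega
  have hba : min A B ≤ max A B := by omega
  have hloop : strWithout3a3bLoop (max A B) (min A B) "" =
      closedAB (max A B) (min A B) := by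
    rw [loop_closed (max A B - min A B).toNat (max A B) (min A B) "" hb hba rfl]
    simp
  rw [alt_eq_closed]
  unfold strWithout3a3b
  simp only [hloop]


-- ===== VERDICT (by name: the statement is the Claim_ definition above) =====
theorem strWithout3a3b_spec : Claim_equal_strWithout3a3b := by
  intro A B _ hpre
  exact strWithout3a3b_spec_aux A B hpre
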